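-- pv_equiv track=rewrite | github.com/MuhammadShoaib756/BD-Assignment1 | Assignment 1.py | checkManyPrime
-- ===== SOURCE A (Python) =====
-- def checkManyPrime(List):
--     allDone = False
--     length = len(List)
--     for x in range(length):
--         check = primeCheck(List[x])
--         if check == True:
--             allDone = True
--         else:
--             return False
--     return True
--
-- def primeCheck(num):
--     # If given number is greater than 1
--     if num > 1:
--         for i in range(2, num):
--             if (num % i) == 0:
--                 return False
--                 break
--         return True
--     else:
--         return False
-- ===== SOURCE B (Python) =====
-- def checkManyPrime(List):
--     return all(_is_prime(x) for x in List)
--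
-- def _is_prime(x):
--     if x < 2:
--         return False
--     d = 2
--     while d * d <= x:
--         if x % d == 0:
--             return False
--         d += 1
--     return True
-- ===== Notes on version B (the rewrite author's own statement) =====
-- stated objective: simpler
-- what changed: Replaces per-element trial division over all of [2, n) with trial division only up to sqrt(n) (while d*d <= x), folded through all().
import Mathlib
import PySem

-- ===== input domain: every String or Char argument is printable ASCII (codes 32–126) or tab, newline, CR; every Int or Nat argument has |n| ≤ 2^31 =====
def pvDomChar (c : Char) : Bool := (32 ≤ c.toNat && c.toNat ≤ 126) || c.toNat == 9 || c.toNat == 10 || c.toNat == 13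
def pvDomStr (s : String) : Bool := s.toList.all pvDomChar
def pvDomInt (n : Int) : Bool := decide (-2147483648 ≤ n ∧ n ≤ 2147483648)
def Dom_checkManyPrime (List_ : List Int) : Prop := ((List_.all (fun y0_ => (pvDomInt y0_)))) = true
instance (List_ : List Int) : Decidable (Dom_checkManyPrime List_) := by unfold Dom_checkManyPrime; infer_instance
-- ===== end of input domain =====

-- B changes the algorithm: trial division only up to sqrt(x) via all(), instead of A's scan over all of [2, num).

-- ===== PORT A =====
-- inner 'for i in range(2, num): if num % i == 0: return False' loop of primeCheck
-- (range is iterated lazily, as Python's range object is; early exit on the first divisor)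
def primeCheckLoop (num i : Int) : Bool :=
  if i < num then
    if PySem.Int.mod num i == 0 then false else primeCheckLoop num (i + 1)
  else true
termination_by (num - i).toNat
decreasing_by omega

def primeCheck (num : Int) : Bool :=
  if num > 1 then primeCheckLoop num 2
  else false

-- 'for x in range(length): ... return False' with early exit (allDone is dead state)
def checkManyPrime (List_ : List Int) : Bool :=
  match List_ with
  | [] => true
  | x :: rest => if primeCheck x then checkManyPrime rest else false

-- ===== PORT B =====
-- 'while d * d <= x:' loop of _is_prime
def trialB (x d : Int) : Bool :=
  if d * d ≤ x then
    if PySem.Int.mod x d == 0 then false else trialB x (d + 1)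
  else true
termination_by (x + 1 - d).toNat
decreasing_by
  have hdx : d ≤ x := by
    by_cases h : d ≤ 0
    · nlinarith
    · nlinarith
  omega

def isPrimeB (x : Int) : Bool :=
  if x < 2 then false else trialB x 2

def checkManyPrime_alt (List_ : List Int) : Bool :=
  List_.all isPrimeB

-- ===== PRECONDITION & SPEC =====
def Spec_checkManyPrime (List_ : List Int) (out : Bool) : Prop := out = checkManyPrime_alt List_
instance (List_ : List Int) (out : Bool) : Decidable (Spec_checkManyPrime List_ out) := by unfold Spec_checkManyPrime; infer_instance

-- ===== CLAIM (what is proved, stated in full; the proofs are below) =====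
def Claim_equal_checkManyPrime : Prop := ∀ (List_ : List Int), Dom_checkManyPrime List_ → Spec_checkManyPrime List_ (checkManyPrime List_)

-- ===== LEMMAS AND PROOFS =====

theorem primeCheckLoop_eq_true_iff (num i : Int) :
    primeCheckLoop num i = true ↔ ∀ j, i ≤ j → j < num → ¬ (j ∣ num) := by
  induction i using primeCheckLoop.induct (num := num) with
  | case1 i hlt hmod =>
    rw [primeCheckLoop, if_pos hlt, if_pos hmod]
    have hdvd : i ∣ num := (PySem.Int.mod_eq_zero_iff_dvd num i).mp (by simpa using hmod)
    constructor
    · intro h; cases h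
    · intro h; exact absurd hdvd (h i le_rfl hlt)
  | case2 i hlt hmod ih =>
    rw [primeCheckLoop, if_pos hlt, if_neg hmod]
    have hndvd : ¬ (i ∣ num) := fun hdd => hmod (by
      simp [(PySem.Int.mod_eq_zero_iff_dvd num i).mpr hdd])
    rw [ih]
    constructor
    · intro h j hij hjn
      rcases eq_or_lt_of_le hij with rfl | h'
      · exact hndvd
      · exact h j (by omega) hjn
    · intro h j hij hjn
      exact h j (by omega) hjn
  | case3 i hlt =>
    rw [primeCheckLoop, if_neg hlt]
    constructor
    · intro _ j hij hjn
      omega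
    · intro _
      rfl

theorem primeCheck_eq_true_iff (num : Int) :
    primeCheck num = true ↔ 1 < num ∧ ∀ i, 2 ≤ i → i < num → ¬ (i ∣ num) := by
  unfold primeCheck
  by_cases h : 1 < num
  · rw [if_pos h, primeCheckLoop_eq_true_iff]
    constructor
    · intro hall
      exact ⟨h, hall⟩
    · intro ⟨_, hall⟩
      exact hall
  · rw [if_neg h]
    simp
    omega

theorem trialB_eq_true_iff (x d : Int) (hd : 2 ≤ d) :
    trialB x d = true ↔ ∀ e, d ≤ e → e * e ≤ x → ¬ (e ∣ x) := by
  induction d using trialB.induct (x := x) with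
  | case1 d hle hmod =>
    rw [trialB, if_pos hle, if_pos hmod]
    have hdvd : d ∣ x := (PySem.Int.mod_eq_zero_iff_dvd x d).mp (by simpa using hmod)
    constructor
    · intro h; cases h
    · intro h; exact absurd hdvd (h d le_rfl hle)
  | case2 d hle hmod ih =>
    rw [trialB, if_pos hle, if_neg hmod]
    have hndvd : ¬ (d ∣ x) := fun hdd => hmod (by
      simp [(PySem.Int.mod_eq_zero_iff_dvd x d).mpr hdd])
    rw [ih (by omega)]
    constructor
    · intro h e he hee
      rcases eq_or_lt_of_le he with rfl | hlt
      · exact hndvd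
      · exact h e (by omega) hee
    · intro h e he hee
      exact h e (by omega) hee
  | case3 d hle =>
    rw [trialB, if_neg hle]
    constructor
    · intro _ e he hee hd'
      apply hle
      calc d * d ≤ e * e := by nlinarith
        _ ≤ x := hee
    · intro _
      rfl

theorem isPrimeB_eq_true_iff (x : Int) :
    isPrimeB x = true ↔ 2 ≤ x ∧ ∀ e, 2 ≤ e → e * e ≤ x → ¬ (e ∣ x) := by
  unfold isPrimeB
  by_cases h : x < 2
  · rw [if_pos h]
    simp only [Bool.false_eq_true, false_iff]
    intro ⟨h2, _⟩
    omega
  · rw [if_neg h, trialB_eq_true_iff x 2 le_rfl]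
    constructor
    · intro hall; exact ⟨by omega, hall⟩
    · intro ⟨_, hall⟩; exact hall

-- the crux: for 1 < num, "no divisor in [2, num)" iff "no divisor e with e*e ≤ num"
theorem divisor_sqrt_iff (num : Int) (h1 : 1 < num) :
    (∀ i, 2 ≤ i → i < num → ¬ (i ∣ num)) ↔ (∀ e, 2 ≤ e → e * e ≤ num → ¬ (e ∣ num)) := by
  constructor
  · intro h e h2 hee
    exact h e h2 (by nlinarith)
  · intro h i h2 hlt hdvd
    obtain ⟨k, hk⟩ := hdvd
    have hkpos : 0 < k := by nlinarith
    have hk2 : 2 ≤ k := by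
      rcases (by omega : k = 1 ∨ 2 ≤ k) with rfl | h'
      · omega
      · exact h'
    rcases le_total i k with hik | hki
    · exact h i h2 (by nlinarith) ⟨k, hk⟩
    · exact h k hk2 (by nlinarith) ⟨i, by rw [hk, mul_comm]⟩

theorem primeCheck_eq_isPrimeB (num : Int) : primeCheck num = isPrimeB num := by
  rw [Bool.eq_iff_iff, primeCheck_eq_true_iff, isPrimeB_eq_true_iff]
  constructor
  · intro ⟨h1, h⟩
    exact ⟨by omega, (divisor_sqrt_iff num h1).mp h⟩
  · intro ⟨h1, h⟩
    exact ⟨by omega, (divisor_sqrt_iff num (by omega)).mpr h⟩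

-- ===== VERDICT (by name: the statement is the Claim_ definition above) =====
theorem checkManyPrime_spec : Claim_equal_checkManyPrime := by
  intro List_ hdom
  unfold Spec_checkManyPrime
  clear hdom
  induction List_ with
  | nil => rfl
  | cons x rest ih =>
    show (if primeCheck x then checkManyPrime rest else false) = _
    rw [primeCheck_eq_isPrimeB]
    by_cases h : isPrimeB x
    · simp [checkManyPrime_alt, h] at ih ⊢
      exact ih
    · simp [checkManyPrime_alt, h]
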